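-- pv_equiv track=rewrite | github.com/ChongKaKam/TAMA | Datasets/Dataset.py | map_pred_window_index_to_global_index_with_confidence
-- ===== SOURCE A (Python) =====
-- def map_pred_window_index_to_global_index_with_confidence(window_index, offset:int=0):
--     global_index_set = {confidence: set() for confidence in range(1, 5)}
--     for start_end_confidence in window_index:
--         if isinstance(start_end_confidence, tuple) or isinstance(start_end_confidence, list):
--             # (A, B, C) or (A, C) or [A, B, C] or [A, C]
--             if len(start_end_confidence) == 0:
--                 continue
--             elif len(start_end_confidence) == 2:
--                 point, confidence = start_end_confidence
--                 # single point
--                 if confidence not in global_index_set: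
--                     continue
--                 global_index_set[confidence].add(point+offset)
--             elif len(start_end_confidence) == 3:
--                 # a range of points
--                 start, end, confidence = start_end_confidence
--                 for i in range(start, end+1):
--                     if confidence not in global_index_set:
--                         continue
--                     global_index_set[confidence].add(i+offset)
--             else:
--                 raise ValueError(f"Invalid abnormal index format: {start_end_confidence}")
--         else:
--             # global_index_set[confidence].add(start_end_confidence+offset)
--             raise ValueError(f"Invalid abnormal index format: {start_end_confidence}")
--     for confidence in global_index_set:
--         global_index_set[confidence] = list(global_index_set[confidence])
--         global_index_set[confidence].sort()
--     return global_index_set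
-- ===== SOURCE B (Python) =====
-- def _item_intervals(item, offset, c):
--     # each item becomes at most one [start, end] interval (with offset applied) for confidence c
--     if len(item) == 2:
--         point, confidence = item
--         return [(point + offset, point + offset)] if confidence == c else []
--     if len(item) == 3:
--         start, end, confidence = item
--         return [(start + offset, end + offset)] if confidence == c and start <= end else []
--     return []
--
--
-- def _intervals(window_index, offset, c):
--     out = []
--     for item in window_index:
--         out += _item_intervals(item, offset, c)
--     return out
--
--
-- def _merge(ivs):
--     # ivs sorted by start; merge overlapping/adjacent intervals
--     merged = []
--     for s, e in ivs:
--         if merged and s <= merged[-1][1] + 1: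
--             if merged[-1][1] < e:
--                 merged[-1] = (merged[-1][0], e)
--         else:
--             merged.append((s, e))
--     return merged
--
--
-- def _expand(merged):
--     return [p for s, e in merged for p in range(s, e + 1)]
--
--
-- def map_pred_window_index_to_global_index_with_confidence(window_index, offset: int = 0):
--     for item in window_index:
--         if not isinstance(item, (tuple, list)) or len(item) not in (0, 2, 3):
--             raise ValueError(f"Invalid abnormal index format: {item}")
--     return {c: _expand(_merge(sorted(_intervals(window_index, offset, c),
--                                      key=lambda iv: iv[0])))
--             for c in (1, 2, 3, 4)}
-- ===== Notes on version B (the rewrite author's own statement) =====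
-- stated objective: faster
-- what changed: Instead of inserting every covered point one by one into per-confidence hash sets and sorting at the end, B collects each item as a single [start,end] interval per confidence, sorts the intervals by start, merges overlapping/adjacent ones, and expands the merged intervals once into an already-sorted deduplicated list.
import Mathlib
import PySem

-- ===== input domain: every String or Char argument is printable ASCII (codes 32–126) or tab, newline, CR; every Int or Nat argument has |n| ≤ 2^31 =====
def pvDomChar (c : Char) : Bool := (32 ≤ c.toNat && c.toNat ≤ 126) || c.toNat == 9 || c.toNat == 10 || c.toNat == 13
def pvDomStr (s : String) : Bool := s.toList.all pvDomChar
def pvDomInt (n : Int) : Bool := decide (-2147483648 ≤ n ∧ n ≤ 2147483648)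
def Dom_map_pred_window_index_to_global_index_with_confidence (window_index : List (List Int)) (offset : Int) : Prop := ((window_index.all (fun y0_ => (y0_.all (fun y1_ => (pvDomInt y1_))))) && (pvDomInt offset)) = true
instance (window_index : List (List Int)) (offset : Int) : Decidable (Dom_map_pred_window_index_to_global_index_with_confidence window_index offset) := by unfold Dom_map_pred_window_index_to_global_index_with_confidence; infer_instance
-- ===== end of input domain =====

-- B replaces A's point-by-point set insertion by per-confidence interval collection, sort-by-start,
-- merge of overlapping/adjacent intervals and a single left-to-right expansion (objective: faster on wide ranges with overlap).


-- ===== PORT A =====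
-- {confidence: set() for confidence in range(1, 5)}
def pvAInit : PySem.Dict Int (PySem.Set Int) :=
  (PySem.List.pyRange 1 5).foldl (fun d c => d.insert c PySem.Set.empty) PySem.Dict.empty

-- the guarded 'if confidence not in global_index_set: continue / global_index_set[confidence].add(x+offset)'
def pvTouch (offset conf x : Int) (d : PySem.Dict Int (PySem.Set Int)) : PySem.Dict Int (PySem.Set Int) :=
  if d.contains conf then d.modify conf PySem.Set.empty (fun s => PySem.Set.add s (x + offset)) else d

-- one iteration of A's main loop (items are always lists here, so the isinstance branch holds;
-- a length ∉ {0,2,3} makes Python raise ValueError — excluded by Pre_, the port leaves d unchanged)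
def pvAStep (offset : Int) (d : PySem.Dict Int (PySem.Set Int)) (item : List Int) : PySem.Dict Int (PySem.Set Int) :=
  match item with
  | [] => d
  | [point, confidence] => pvTouch offset confidence point d
  | [start, end_, confidence] =>
      (PySem.List.pyRange start (end_ + 1)).foldl (fun d i => pvTouch offset confidence i d) d
  | _ => d

def map_pred_window_index_to_global_index_with_confidence (window_index : List (List Int)) (offset : Int) : List (Int × List Int) :=
  -- final loop: global_index_set[confidence] = sorted list of the set (list(set) order is erased by the sort)
  ((window_index.foldl (pvAStep offset) pvAInit).items).map
    (fun p => (p.1, PySem.List.sorted p.2 (fun x => x)))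

-- ===== PORT B =====
def pvItemIntervals (offset c : Int) (item : List Int) : List (Int × Int) :=
  match item with
  | [point, confidence] => if confidence = c then [(point + offset, point + offset)] else []
  | [start, end_, confidence] =>
      if confidence = c ∧ start ≤ end_ then [(start + offset, end_ + offset)] else []
  | _ => []    -- length 0 contributes nothing; other lengths raise ValueError in Source B (outside Pre_)

-- _intervals: 'out += _item_intervals(item, offset, c)'
def pvIntervals (offset c : Int) (window_index : List (List Int)) : List (Int × Int) :=
  window_index.foldl (fun out item => out ++ pvItemIntervals offset c item) []

-- one iteration of _merge's loop; the accumulator is kept reversed (head = merged[-1])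
def pvMStep (merged : List (Int × Int)) (iv : Int × Int) : List (Int × Int) :=
  match merged with
  | [] => [iv]
  | (ms, me) :: rest =>
      if iv.1 ≤ me + 1 then
        if me < iv.2 then (ms, iv.2) :: rest else (ms, me) :: rest
      else iv :: (ms, me) :: rest

def pvMerge (ivs : List (Int × Int)) : List (Int × Int) :=
  (ivs.foldl pvMStep []).reverse

-- _expand: [p for s, e in merged for p in range(s, e + 1)]
def pvExpand (merged : List (Int × Int)) : List Int :=
  merged.flatMap (fun iv => PySem.List.pyRange iv.1 (iv.2 + 1))

def map_pred_window_index_to_global_index_with_confidence_alt (window_index : List (List Int)) (offset : Int) : List (Int × List Int) :=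
  -- Source B's validation loop only raises (outside Pre_) and computes nothing; {c: … for c in (1,2,3,4)}:
  [1, 2, 3, 4].map (fun c =>
    (c, pvExpand (pvMerge (PySem.List.sorted (pvIntervals offset c window_index) (fun iv => iv.1)))))

-- ===== PRECONDITION & SPEC =====
-- Pre_ excludes exactly the inputs with an item of length ∉ {0,2,3}, on which Python A raises ValueError.
def Pre_map_pred_window_index_to_global_index_with_confidence (window_index : List (List Int)) (offset : Int) : Prop :=
  ∀ item ∈ window_index, item.length = 0 ∨ item.length = 2 ∨ item.length = 3
instance (window_index : List (List Int)) (offset : Int) : Decidable (Pre_map_pred_window_index_to_global_index_with_confidence window_index offset) := by unfold Pre_map_pred_window_index_to_global_index_with_confidence; infer_instance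

def pvWitness_map_pred_window_index_to_global_index_with_confidence : List (List Int) × Int :=
  ([[4, 1], [2, 6, 1], [], [0, 2, 2], [7, 5, 3]], 10)

def Spec_map_pred_window_index_to_global_index_with_confidence (window_index : List (List Int)) (offset : Int) (out : List (Int × List Int)) : Prop := out = map_pred_window_index_to_global_index_with_confidence_alt window_index offset
instance (window_index : List (List Int)) (offset : Int) (out : List (Int × List Int)) : Decidable (Spec_map_pred_window_index_to_global_index_with_confidence window_index offset out) := by unfold Spec_map_pred_window_index_to_global_index_with_confidence; infer_instance

-- ===== CLAIM (what is proved, stated in full; the proofs are below) =====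
def Claim_equal_map_pred_window_index_to_global_index_with_confidence : Prop := ∀ (window_index : List (List Int)) (offset : Int), Dom_map_pred_window_index_to_global_index_with_confidence window_index offset → Pre_map_pred_window_index_to_global_index_with_confidence window_index offset → Spec_map_pred_window_index_to_global_index_with_confidence window_index offset (map_pred_window_index_to_global_index_with_confidence window_index offset)

-- ===== LEMMAS AND PROOFS =====

-- x is covered by one of the intervals of l
def pvCov (l : List (Int × Int)) (x : Int) : Prop := ∃ iv ∈ l, iv.1 ≤ x ∧ x ≤ iv.2

-- the points item contributes to confidence c (offset applied)
def pvContrib (offset c x : Int) : List Int → Prop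
  | [p, conf] => conf = c ∧ x = p + offset
  | [s, e, conf] => conf = c ∧ s + offset ≤ x ∧ x ≤ e + offset
  | _ => False

theorem pvCov_nil (x : Int) : pvCov [] x ↔ False := by simp [pvCov]

theorem pvCov_cons (a : Int × Int) (l : List (Int × Int)) (x : Int) :
    pvCov (a :: l) x ↔ (a.1 ≤ x ∧ x ≤ a.2) ∨ pvCov l x := by
  simp [pvCov]

-- ---- A side ----
theorem pvTouch_contains (offset conf x : Int) (d : PySem.Dict Int (PySem.Set Int)) (k : Int) :
    (pvTouch offset conf x d).contains k = d.contains k := by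
  unfold pvTouch
  split
  · rename_i h
    rw [PySem.Dict.contains_modify]
    by_cases hk : k = conf
    · subst hk; simp [h]
    · simp [hk]
  · rfl

theorem pvTouch_getD (offset conf x : Int) (d : PySem.Dict Int (PySem.Set Int)) (k : Int) :
    (pvTouch offset conf x d).getD k PySem.Set.empty =
      if d.contains conf = true ∧ conf = k then PySem.Set.add (d.getD k PySem.Set.empty) (x + offset)
      else d.getD k PySem.Set.empty := by
  unfold pvTouch
  split
  · rename_i h
    rw [PySem.Dict.getD_modify]
    by_cases hk : k = conf
    · subst hk; simp [h]
    · have hk' : ¬ conf = k := fun hh => hk hh.symm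
      simp [hk, hk']
  · rename_i h
    simp [h]

theorem pvInner_contains (offset conf : Int) (rng : List Int) :
    ∀ (d : PySem.Dict Int (PySem.Set Int)) (k : Int),
      (rng.foldl (fun d i => pvTouch offset conf i d) d).contains k = d.contains k := by
  induction rng with
  | nil => intro d k; rfl
  | cons i t ih => intro d k; simp only [List.foldl_cons]; rw [ih, pvTouch_contains]

theorem pvInner_getD (offset conf : Int) (rng : List Int) :
    ∀ (d : PySem.Dict Int (PySem.Set Int)) (k : Int),
      (rng.foldl (fun d i => pvTouch offset conf i d) d).getD k PySem.Set.empty =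
        if d.contains conf = true ∧ conf = k then
          rng.foldl (fun st i => PySem.Set.add st (i + offset)) (d.getD k PySem.Set.empty)
        else d.getD k PySem.Set.empty := by
  induction rng with
  | nil => intro d k; simp
  | cons i t ih =>
      intro d k
      simp only [List.foldl_cons]
      rw [ih, pvTouch_contains, pvTouch_getD]
      by_cases h : d.contains conf = true ∧ conf = k
      · obtain ⟨h1, h2⟩ := h; subst h2; simp [h1]
      · simp [h]

theorem pvAStep_contains (offset : Int) (d : PySem.Dict Int (PySem.Set Int)) (item : List Int) (k : Int) :
    (pvAStep offset d item).contains k = d.contains k := by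
  unfold pvAStep
  match item with
  | [] => rfl
  | [a] => rfl
  | [p, conf] => exact pvTouch_contains offset conf p d k
  | [s, e, conf] => exact pvInner_contains offset conf _ d k
  | a :: b :: c :: dd :: t => rfl

theorem pvAStep_mem (offset : Int) (d : PySem.Dict Int (PySem.Set Int)) (item : List Int) (k x : Int) :
    x ∈ (pvAStep offset d item).getD k PySem.Set.empty ↔
      x ∈ d.getD k PySem.Set.empty ∨ (d.contains k = true ∧ pvContrib offset k x item) := by
  unfold pvAStep
  match item with
  | [] => simp [pvContrib]
  | [a] => simp [pvContrib]
  | [p, conf] =>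
      rw [pvTouch_getD]
      by_cases h : d.contains conf = true ∧ conf = k
      · obtain ⟨h1, h2⟩ := h; subst h2
        simp [PySem.Set.mem_add, pvContrib, h1]
      · simp only [if_neg h]
        simp only [pvContrib]
        constructor
        · intro hx; exact Or.inl hx
        · rintro (hx | ⟨hk, hc, hx⟩)
          · exact hx
          · exact absurd ⟨hc ▸ hk, hc⟩ h
  | [s, e, conf] =>
      rw [pvInner_getD]
      by_cases h : d.contains conf = true ∧ conf = k
      · obtain ⟨h1, h2⟩ := h; subst h2
        rw [if_pos ⟨h1, rfl⟩, ← PySem.Set.update_map_eq_foldl_add, PySem.Set.mem_update]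
        simp only [pvContrib, h1, true_and, List.mem_map, PySem.List.mem_pyRange_one]
        constructor
        · rintro (hx | ⟨i, ⟨hi1, hi2⟩, rfl⟩)
          · exact Or.inl hx
          · exact Or.inr ⟨by omega, by omega⟩
        · rintro (hx | ⟨hb1, hb2⟩)
          · exact Or.inl hx
          · exact Or.inr ⟨x - offset, ⟨by omega, by omega⟩, by omega⟩
      · simp only [if_neg h]
        simp only [pvContrib]
        constructor
        · intro hx; exact Or.inl hx
        · rintro (hx | ⟨hk, hc, _, _⟩)
          · exact hx
          · exact absurd ⟨hc ▸ hk, hc⟩ h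
  | a :: b :: c :: dd :: t => simp [pvContrib]

theorem pvAStep_nodup (offset : Int) (d : PySem.Dict Int (PySem.Set Int)) (item : List Int) (k : Int)
    (h : (d.getD k PySem.Set.empty).Nodup) :
    ((pvAStep offset d item).getD k PySem.Set.empty).Nodup := by
  unfold pvAStep
  match item with
  | [] => exact h
  | [a] => exact h
  | [p, conf] =>
      rw [pvTouch_getD]; split
      · exact PySem.Set.nodup_add _ _ h
      · exact h
  | [s, e, conf] =>
      rw [pvInner_getD]; split
      · rw [← PySem.Set.update_map_eq_foldl_add]
        exact PySem.Set.nodup_update _ _ h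
      · exact h
  | a :: b :: c :: dd :: t => exact h

theorem pvFoldA_mem (offset : Int) (wi : List (List Int)) :
    ∀ (d : PySem.Dict Int (PySem.Set Int)) (k x : Int),
      x ∈ (wi.foldl (pvAStep offset) d).getD k PySem.Set.empty ↔
        x ∈ d.getD k PySem.Set.empty ∨ (d.contains k = true ∧ ∃ item ∈ wi, pvContrib offset k x item) := by
  induction wi with
  | nil => intro d k x; simp
  | cons it t ih =>
      intro d k x
      simp only [List.foldl_cons]
      rw [ih, pvAStep_mem, pvAStep_contains]
      simp only [List.mem_cons]
      constructor
      · rintro ((hx | ⟨hc, hco⟩) | ⟨hc, item, hit, hco⟩)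
        · exact Or.inl hx
        · exact Or.inr ⟨hc, it, Or.inl rfl, hco⟩
        · exact Or.inr ⟨hc, item, Or.inr hit, hco⟩
      · rintro (hx | ⟨hc, item, (rfl | hit), hco⟩)
        · exact Or.inl (Or.inl hx)
        · exact Or.inl (Or.inr ⟨hc, hco⟩)
        · exact Or.inr ⟨hc, item, hit, hco⟩

theorem pvFoldA_nodup (offset : Int) (wi : List (List Int)) :
    ∀ (d : PySem.Dict Int (PySem.Set Int)) (k : Int),
      (d.getD k PySem.Set.empty).Nodup → ((wi.foldl (pvAStep offset) d).getD k PySem.Set.empty).Nodup := by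
  induction wi with
  | nil => intro d k h; exact h
  | cons it t ih =>
      intro d k h
      simp only [List.foldl_cons]
      exact ih _ k (pvAStep_nodup offset d it k h)

theorem pvTouch_keys (offset conf x : Int) (d : PySem.Dict Int (PySem.Set Int)) :
    (pvTouch offset conf x d).keys = d.keys := by
  unfold pvTouch
  split
  · rename_i h
    rw [PySem.Dict.keys_modify, PySem.Dict.keys_insert_of_contains _ _ h]
  · rfl

theorem pvInner_keys (offset conf : Int) (rng : List Int) :
    ∀ d : PySem.Dict Int (PySem.Set Int),
      (rng.foldl (fun d i => pvTouch offset conf i d) d).keys = d.keys := by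
  induction rng with
  | nil => intro d; rfl
  | cons i t ih => intro d; simp only [List.foldl_cons]; rw [ih, pvTouch_keys]

theorem pvAStep_keys (offset : Int) (d : PySem.Dict Int (PySem.Set Int)) (item : List Int) :
    (pvAStep offset d item).keys = d.keys := by
  unfold pvAStep
  match item with
  | [] => rfl
  | [a] => rfl
  | [p, conf] => exact pvTouch_keys offset conf p d
  | [s, e, conf] => exact pvInner_keys offset conf _ d
  | a :: b :: c :: dd :: t => rfl

theorem pvFoldA_keys (offset : Int) (wi : List (List Int)) :
    ∀ d : PySem.Dict Int (PySem.Set Int), (wi.foldl (pvAStep offset) d).keys = d.keys := by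
  induction wi with
  | nil => intro d; rfl
  | cons it t ih => intro d; simp only [List.foldl_cons]; rw [ih, pvAStep_keys]

-- A's output in closed per-confidence form
theorem pvA_normal (offset : Int) (wi : List (List Int)) :
    map_pred_window_index_to_global_index_with_confidence wi offset =
      [1, 2, 3, 4].map (fun k =>
        (k, PySem.List.sorted ((wi.foldl (pvAStep offset) pvAInit).getD k PySem.Set.empty) (fun x => x))) := by
  unfold map_pred_window_index_to_global_index_with_confidence
  have hkeys : (wi.foldl (pvAStep offset) pvAInit).keys = [1, 2, 3, 4] := by
    rw [pvFoldA_keys]; decide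
  have hnd : (wi.foldl (pvAStep offset) pvAInit).keys.Nodup := by rw [hkeys]; decide
  rw [PySem.Dict.items_eq_map_keys _ hnd PySem.Set.empty, hkeys, List.map_map]
  rfl

-- ---- B side ----
theorem pvItemIntervals_ne (offset c : Int) (item : List Int) :
    ∀ iv ∈ pvItemIntervals offset c item, iv.1 ≤ iv.2 := by
  match item with
  | [] => simp [pvItemIntervals]
  | [a] => simp [pvItemIntervals]
  | [p, conf] =>
      show ∀ iv ∈ (if conf = c then [(p + offset, p + offset)] else []), iv.1 ≤ iv.2
      split <;> simp
  | [s, e, conf] =>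
      show ∀ iv ∈ (if conf = c ∧ s ≤ e then [(s + offset, e + offset)] else []), iv.1 ≤ iv.2
      split
      · rename_i h; simp; omega
      · simp
  | a :: b :: cc :: dd :: t => simp [pvItemIntervals]

theorem pvItemIntervals_cov (offset c : Int) (item : List Int) (x : Int) :
    (∃ iv ∈ pvItemIntervals offset c item, iv.1 ≤ x ∧ x ≤ iv.2) ↔ pvContrib offset c x item := by
  match item with
  | [] => simp [pvItemIntervals, pvContrib]
  | [a] => simp [pvItemIntervals, pvContrib]
  | [p, conf] =>
      show (∃ iv ∈ (if conf = c then [(p + offset, p + offset)] else []), iv.1 ≤ x ∧ x ≤ iv.2) ↔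
        pvContrib offset c x [p, conf]
      by_cases h : conf = c
      · simp [h, pvContrib] <;> omega
      · simp [h, pvContrib]
  | [s, e, conf] =>
      show (∃ iv ∈ (if conf = c ∧ s ≤ e then [(s + offset, e + offset)] else []), iv.1 ≤ x ∧ x ≤ iv.2) ↔
        pvContrib offset c x [s, e, conf]
      by_cases h : conf = c ∧ s ≤ e
      · obtain ⟨h1, h2⟩ := h; simp [h1, h2, pvContrib] <;> omega
      · rw [if_neg h]
        simp only [pvContrib, List.not_mem_nil]
        constructor
        · rintro ⟨iv, hiv, -⟩; exact absurd hiv (by simp)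
        · rintro ⟨hc, hb1, hb2⟩; exact absurd ⟨hc, by omega⟩ h
  | a :: b :: cc :: dd :: t => simp [pvItemIntervals, pvContrib]

theorem pvIntervals_eq (offset c : Int) (wi : List (List Int)) :
    pvIntervals offset c wi = wi.flatMap (pvItemIntervals offset c) := by
  unfold pvIntervals
  rw [PySem.List.foldl_append_eq_flatMap]
  rfl

theorem pvIntervals_cov (offset c : Int) (wi : List (List Int)) (x : Int) :
    pvCov (pvIntervals offset c wi) x ↔ ∃ item ∈ wi, pvContrib offset c x item := by
  rw [pvIntervals_eq]
  unfold pvCov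
  constructor
  · rintro ⟨iv, hiv, hb⟩
    rw [List.mem_flatMap] at hiv
    obtain ⟨item, hit, hiv⟩ := hiv
    exact ⟨item, hit, (pvItemIntervals_cov offset c item x).mp ⟨iv, hiv, hb⟩⟩
  · rintro ⟨item, hit, hco⟩
    obtain ⟨iv, hiv, hb⟩ := (pvItemIntervals_cov offset c item x).mpr hco
    exact ⟨iv, List.mem_flatMap.mpr ⟨item, hit, hiv⟩, hb⟩

theorem pvIntervals_ne (offset c : Int) (wi : List (List Int)) :
    ∀ iv ∈ pvIntervals offset c wi, iv.1 ≤ iv.2 := by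
  rw [pvIntervals_eq]
  intro iv hiv
  rw [List.mem_flatMap] at hiv
  obtain ⟨item, -, hiv⟩ := hiv
  exact pvItemIntervals_ne offset c item iv hiv

-- one merge step
theorem pvMStep_spec (acc : List (Int × Int)) (iv : Int × Int)
    (hne : ∀ jv ∈ acc, jv.1 ≤ jv.2) (hch : acc.IsChain (fun a b => b.2 + 1 < a.1))
    (hhd : ∀ h ∈ acc.head?, h.1 ≤ iv.1) (hiv : iv.1 ≤ iv.2) :
    (∀ jv ∈ pvMStep acc iv, jv.1 ≤ jv.2) ∧
    (pvMStep acc iv).IsChain (fun a b => b.2 + 1 < a.1) ∧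
    (∀ h ∈ (pvMStep acc iv).head?, h.1 ≤ iv.1) ∧
    (∀ x, pvCov (pvMStep acc iv) x ↔ pvCov acc x ∨ (iv.1 ≤ x ∧ x ≤ iv.2)) := by
  match acc with
  | [] =>
      simp only [pvMStep]
      refine ⟨by simpa using hiv, by simp, by simp, ?_⟩
      intro x; simp only [pvCov_cons, pvCov_nil]; tauto
  | (ms, me) :: rest =>
      have hms : ms ≤ iv.1 := hhd (ms, me) (by simp)
      have hme : ms ≤ me := hne (ms, me) (by simp)
      have hrest : ∀ jv ∈ rest, jv.1 ≤ jv.2 := fun jv h => hne jv (List.mem_cons_of_mem _ h)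
      simp only [pvMStep]
      by_cases h1 : iv.1 ≤ me + 1
      · by_cases h2 : me < iv.2
        · rw [if_pos h1, if_pos h2]
          refine ⟨?_, ?_, ?_, ?_⟩
          · intro jv hjv
            rcases List.mem_cons.mp hjv with rfl | hm
            · simp; omega
            · exact hrest jv hm
          · match rest with
            | [] => simp
            | r :: rs =>
                have := List.isChain_cons_cons.mp hch
                exact List.IsChain.cons_cons (by simpa using this.1) this.2
          · intro h hh; simp at hh; subst hh; simpa using hms
          · intro x
            simp only [pvCov_cons]
            by_cases hC : pvCov rest x <;> simp [hC] <;> omega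
        · rw [if_pos h1, if_neg h2]
          refine ⟨hne, hch, ?_, ?_⟩
          · intro h hh; simp at hh; subst hh; simpa using hms
          · intro x
            simp only [pvCov_cons]
            by_cases hC : pvCov rest x <;> simp [hC] <;> omega
      · rw [if_neg h1]
        refine ⟨?_, ?_, ?_, ?_⟩
        · intro jv hjv
          rcases List.mem_cons.mp hjv with rfl | hm
          · exact hiv
          · exact hne jv hm
        · exact List.IsChain.cons_cons (by simp; omega) hch
        · intro h hh; simp at hh; subst hh; exact le_refl _
        · intro x
          simp only [pvCov_cons]
          by_cases hC : pvCov rest x <;> simp [hC] <;> omega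

theorem pvMFold_spec (ivs : List (Int × Int)) :
    ∀ acc : List (Int × Int),
      (∀ iv ∈ ivs, iv.1 ≤ iv.2) → ivs.Pairwise (fun a b => a.1 ≤ b.1) →
      (∀ jv ∈ acc, jv.1 ≤ jv.2) → acc.IsChain (fun a b => b.2 + 1 < a.1) →
      (∀ iv ∈ ivs, ∀ h ∈ acc.head?, h.1 ≤ iv.1) →
      (∀ jv ∈ ivs.foldl pvMStep acc, jv.1 ≤ jv.2) ∧
      (ivs.foldl pvMStep acc).IsChain (fun a b => b.2 + 1 < a.1) ∧
      (∀ x, pvCov (ivs.foldl pvMStep acc) x ↔ pvCov acc x ∨ pvCov ivs x) := by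
  induction ivs with
  | nil =>
      intro acc _ _ h3 h4 _
      refine ⟨h3, h4, fun x => ?_⟩
      rw [pvCov_nil]; tauto
  | cons iv t ih =>
      intro acc h1 h2 h3 h4 h5
      have hiv : iv.1 ≤ iv.2 := h1 iv (by simp)
      obtain ⟨s1, s2, s3, s4⟩ := pvMStep_spec acc iv h3 h4 (h5 iv (by simp)) hiv
      have hpair := List.pairwise_cons.mp h2
      simp only [List.foldl_cons]
      obtain ⟨r1, r2, r3⟩ := ih (pvMStep acc iv)
        (fun jv hj => h1 jv (List.mem_cons_of_mem _ hj)) hpair.2 s1 s2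
        (fun jv hj h hh => le_trans (s3 h hh) (hpair.1 jv hj))
      refine ⟨r1, r2, fun x => ?_⟩
      rw [r3, s4, pvCov_cons]
      tauto

theorem pvMerge_spec (ivs : List (Int × Int))
    (h1 : ∀ iv ∈ ivs, iv.1 ≤ iv.2) (h2 : ivs.Pairwise (fun a b => a.1 ≤ b.1)) :
    (∀ jv ∈ pvMerge ivs, jv.1 ≤ jv.2) ∧
    (pvMerge ivs).IsChain (fun a b => a.2 + 1 < b.1) ∧
    (∀ x, pvCov (pvMerge ivs) x ↔ pvCov ivs x) := by
  obtain ⟨r1, r2, r3⟩ := pvMFold_spec ivs [] h1 h2 (by simp) (by simp) (by simp)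
  unfold pvMerge
  refine ⟨fun jv hj => r1 jv (List.mem_reverse.mp hj), List.isChain_reverse.mpr r2, fun x => ?_⟩
  have : pvCov ((ivs.foldl pvMStep []).reverse) x ↔ pvCov (ivs.foldl pvMStep []) x := by
    unfold pvCov; simp
  rw [this, r3, pvCov_nil]; tauto

theorem pvExpand_mem (l : List (Int × Int)) (x : Int) :
    x ∈ pvExpand l ↔ pvCov l x := by
  unfold pvExpand pvCov
  rw [List.mem_flatMap]
  constructor
  · rintro ⟨iv, hiv, hx⟩
    rw [PySem.List.mem_pyRange_one] at hx
    exact ⟨iv, hiv, by omega⟩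
  · rintro ⟨iv, hiv, hx⟩
    exact ⟨iv, hiv, PySem.List.mem_pyRange_one.mpr (by omega)⟩

-- in a gap-separated chain of nonempty intervals every later interval starts above the head's end
theorem pvChain_lb (h : Int × Int) (t : List (Int × Int)) :
    ∀ (hch : (h :: t).IsChain (fun a b => a.2 + 1 < b.1)) (hne : ∀ iv ∈ t, iv.1 ≤ iv.2),
      ∀ iv ∈ t, h.2 + 1 < iv.1 := by
  induction t generalizing h with
  | nil => intro _ _ iv hiv; simp at hiv
  | cons b t ih =>
      intro hch hne iv hiv
      have hstep := List.isChain_cons_cons.mp hch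
      rcases List.mem_cons.mp hiv with rfl | hm
      · exact hstep.1
      · have hb : b.1 ≤ b.2 := hne b (by simp)
        have := ih b hstep.2 (fun jv hj => hne jv (List.mem_cons_of_mem _ hj)) iv hm
        omega

theorem pvExpand_pairwise (l : List (Int × Int))
    (hne : ∀ iv ∈ l, iv.1 ≤ iv.2) (hch : l.IsChain (fun a b => a.2 + 1 < b.1)) :
    (pvExpand l).Pairwise (· < ·) := by
  induction l with
  | nil => simp [pvExpand]
  | cons h t ih =>
      have hstep : pvExpand (h :: t) = PySem.List.pyRange h.1 (h.2 + 1) ++ pvExpand t := by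
        simp [pvExpand]
      rw [hstep, List.pairwise_append]
      refine ⟨PySem.List.pairwise_lt_pyRange_one _ _, ?_, ?_⟩
      · refine ih (fun iv hiv => hne iv (List.mem_cons_of_mem _ hiv)) ?_
        cases t with
        | nil => simp
        | cons b ts => exact (List.isChain_cons_cons.mp hch).2
      · intro a ha b hb
        rw [PySem.List.mem_pyRange_one] at ha
        rw [pvExpand_mem] at hb
        obtain ⟨iv, hiv, hbv⟩ := hb
        have := pvChain_lb h t hch (fun jv hj => hne jv (List.mem_cons_of_mem _ hj)) iv hiv
        omega

-- B's entry for confidence c, fully characterised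
theorem pvB_entry (offset c : Int) (wi : List (List Int)) :
    (pvExpand (pvMerge (PySem.List.sorted (pvIntervals offset c wi) (fun iv => iv.1)))).Pairwise (· < ·) ∧
    (∀ x, x ∈ pvExpand (pvMerge (PySem.List.sorted (pvIntervals offset c wi) (fun iv => iv.1))) ↔
      ∃ item ∈ wi, pvContrib offset c x item) := by
  set ivs := PySem.List.sorted (pvIntervals offset c wi) (fun iv => iv.1) with hivs
  have hperm : ivs.Perm (pvIntervals offset c wi) := PySem.List.sorted_perm _ _ _
  have hne : ∀ iv ∈ ivs, iv.1 ≤ iv.2 := fun iv hiv =>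
    pvIntervals_ne offset c wi iv (hperm.mem_iff.mp hiv)
  have hpw : ivs.Pairwise (fun a b => a.1 ≤ b.1) := PySem.List.sorted_pairwise _ _
  obtain ⟨m1, m2, m3⟩ := pvMerge_spec ivs hne hpw
  refine ⟨pvExpand_pairwise _ m1 m2, fun x => ?_⟩
  rw [pvExpand_mem, m3]
  have : pvCov ivs x ↔ pvCov (pvIntervals offset c wi) x := by
    unfold pvCov
    exact ⟨fun ⟨iv, hiv, hb⟩ => ⟨iv, hperm.mem_iff.mp hiv, hb⟩,
           fun ⟨iv, hiv, hb⟩ => ⟨iv, hperm.mem_iff.mpr hiv, hb⟩⟩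
  rw [this, pvIntervals_cov]

-- per-confidence equality (c one of 1,2,3,4, so pvAInit contains it with the empty set)
theorem pvEntry_eq (offset c : Int) (wi : List (List Int))
    (hc : pvAInit.contains c = true) (hg : pvAInit.getD c PySem.Set.empty = []) :
    PySem.List.sorted ((wi.foldl (pvAStep offset) pvAInit).getD c PySem.Set.empty) (fun x => x) =
      pvExpand (pvMerge (PySem.List.sorted (pvIntervals offset c wi) (fun iv => iv.1))) := by
  obtain ⟨hbp, hbm⟩ := pvB_entry offset c wi
  have hmemA : ∀ x, x ∈ (wi.foldl (pvAStep offset) pvAInit).getD c PySem.Set.empty ↔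
      ∃ item ∈ wi, pvContrib offset c x item := by
    intro x
    rw [pvFoldA_mem, hg]
    simp [hc]
  have hndA : ((wi.foldl (pvAStep offset) pvAInit).getD c PySem.Set.empty).Nodup :=
    pvFoldA_nodup offset wi pvAInit c (by rw [hg]; exact List.nodup_nil)
  have hndB : (pvExpand (pvMerge (PySem.List.sorted (pvIntervals offset c wi) (fun iv => iv.1)))).Nodup :=
    hbp.imp (fun hab => ne_of_lt hab)
  have hperm : (pvExpand (pvMerge (PySem.List.sorted (pvIntervals offset c wi) (fun iv => iv.1)))).Perm
      ((wi.foldl (pvAStep offset) pvAInit).getD c PySem.Set.empty) := by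
    rw [List.perm_ext_iff_of_nodup hndB hndA]
    intro a
    rw [hbm, hmemA]
  exact PySem.List.sorted_eq_of_perm_of_pairwise_lt _ _ _ hperm hbp

-- ===== VERDICT (by name: the statement is the Claim_ definition above) =====
theorem map_pred_window_index_to_global_index_with_confidence_spec : Claim_equal_map_pred_window_index_to_global_index_with_confidence := by
  intro wi offset _ _
  unfold Spec_map_pred_window_index_to_global_index_with_confidence
  rw [pvA_normal]
  unfold map_pred_window_index_to_global_index_with_confidence_alt
  refine List.map_congr_left ?_
  intro c hcm
  have hc : pvAInit.contains c = true := by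
    fin_cases hcm <;> decide
  have hg : pvAInit.getD c PySem.Set.empty = [] := by
    fin_cases hcm <;> decide
  rw [pvEntry_eq offset c wi hc hg]
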